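-- pv_equiv track=rewrite | github.com/RemDec/topic_dler | serveur_distant/utils.py | reduce_name
-- ===== SOURCE A (Python) =====
-- def reduce_name(url, sep_list=['/', '-'], ext=None):
--     max_ind = -1
--     for sep in sep_list:
--         max_ind = max(url.rfind(sep), max_ind)
--     name = url[max_ind+1:]
--     if ext is not None and not '.' in name:
--         if ',' in ext:
--             ext = ext[:ext.index(',')]
--         if not(name.endswith('.'+ext)):
--             name += '.'+ext
--     while len(name) > 75:
--         name = name[30:]
--     return name
-- ===== SOURCE B (Python) =====
-- def reduce_name(url, sep_list=['/', '-'], ext=None):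
--     # cut after the rightmost occurrence of any separator, in one expression
--     start = 1 + max((url.rfind(sep) for sep in sep_list), default=-1)
--     name = url[start:]
--     if ext is not None and '.' not in name:
--         # a dot-free name can never already end with '.'+ext, so append unconditionally
--         i = ext.find(',')
--         name = name + '.' + (ext if i == -1 else ext[:i])
--     n = len(name)
--     if n > 75:
--         # closed form for "while len > 75: drop 30": drop ceil((n-75)/30) * 30 chars in one slice
--         name = name[30 * ((n - 46) // 30):]
--     return name
-- ===== Notes on version B (the rewrite author's own statement) =====
-- stated objective: simpler
-- what changed: The `while len(name) > 75: name = name[30:]` loop is replaced by a single closed-form slice name[30*((len(name)-46)//30):], the cut point is computed as one max-with-default over the rfind values instead of a running-max loop, and the dead endswith test is dropped (a dot-free name can never already end with '.'+ext), appending the extension unconditionally.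
import Mathlib
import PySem

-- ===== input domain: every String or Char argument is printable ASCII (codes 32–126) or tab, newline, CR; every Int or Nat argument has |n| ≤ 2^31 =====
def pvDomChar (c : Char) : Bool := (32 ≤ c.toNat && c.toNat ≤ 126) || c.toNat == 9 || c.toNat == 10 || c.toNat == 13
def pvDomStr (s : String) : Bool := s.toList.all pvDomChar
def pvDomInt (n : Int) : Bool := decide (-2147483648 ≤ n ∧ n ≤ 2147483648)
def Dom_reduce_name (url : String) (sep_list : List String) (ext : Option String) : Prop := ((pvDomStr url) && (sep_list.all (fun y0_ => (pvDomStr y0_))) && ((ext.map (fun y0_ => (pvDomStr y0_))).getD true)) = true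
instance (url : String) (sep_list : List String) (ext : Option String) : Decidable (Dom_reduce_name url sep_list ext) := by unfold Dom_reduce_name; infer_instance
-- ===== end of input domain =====

-- B replaces the `while len > 75: name = name[30:]` loop with one closed-form slice,
-- appends the extension unconditionally (a dot-free name never already ends with '.'+ext), and
-- computes the cut point as a single max over the rfind values; return values are identical.

-- ===== PORT A =====
-- A's `while len(name) > 75: name = name[30:]` loop, step for step (name[30:] on a
-- string of length > 75 is `drop 30`).
def trimA (name : List Char) : List Char :=
  if name.length > 75 then trimA (name.drop 30) else name
termination_by name.length
decreasing_by simp; omega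

def reduce_name (url : String) (sep_list : List String) (ext : Option String) : String :=
  let u := url.toList
  let max_ind : Int := sep_list.foldl (fun m sep => max (PySem.Chars.rfind u sep.toList) m) (-1)
  let name := PySem.Chars.slice u (some (max_ind + 1)) none
  let name : List Char :=
    match ext with
    | none => name
    | some e0 =>
      if PySem.Chars.isIn ['.'] name then name
      else
        let e := e0.toList
        -- ext.index(',') equals Chars.find here: the branch guarantees ',' occurs in e
        let e := if PySem.Chars.isIn [','] e then
                   PySem.Chars.slice e none (some (PySem.Chars.find e [','])) else e
        if PySem.Chars.endswith name ('.' :: e) then name else name ++ '.' :: e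
  String.ofList (trimA name)

-- ===== PORT B =====
def reduce_name_alt (url : String) (sep_list : List String) (ext : Option String) : String :=
  let u := url.toList
  let start : Int :=
    1 + PySem.List.maxD (sep_list.map (fun sep => PySem.Chars.rfind u sep.toList)) (fun x => x) (-1)
  let name := PySem.Chars.slice u (some start) none
  let name : List Char :=
    match ext with
    | none => name
    | some e0 =>
      if PySem.Chars.isIn ['.'] name then name
      else
        let e := e0.toList
        let i := PySem.Chars.find e [',']
        name ++ '.' :: (if i = -1 then e else PySem.Chars.slice e none (some i))
  -- the arithmetic is on Nat: n > 75, so n - 46 and the Python `//` agree with Nat `-` and `/`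
  let n := name.length
  String.ofList (if n > 75 then name.drop (30 * ((n - 46) / 30)) else name)

-- ===== PRECONDITION & SPEC =====
def Spec_reduce_name (url : String) (sep_list : List String) (ext : Option String) (out : String) : Prop := out = reduce_name_alt url sep_list ext
instance (url : String) (sep_list : List String) (ext : Option String) (out : String) : Decidable (Spec_reduce_name url sep_list ext out) := by unfold Spec_reduce_name; infer_instance

-- ===== CLAIM (what is proved, stated in full; the proofs are below) =====
def Claim_equal_reduce_name : Prop := ∀ (url : String) (sep_list : List String) (ext : Option String), Dom_reduce_name url sep_list ext → Spec_reduce_name url sep_list ext (reduce_name url sep_list ext)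

-- ===== LEMMAS AND PROOFS =====

-- rfind never returns less than -1
theorem rfind_go_ge (s sub : List Char) (k : Nat) : -1 ≤ PySem.Chars.rfind.go s sub k := by
  induction k with
  | zero => rw [PySem.Chars.rfind.go]; split <;> omega
  | succ j ih => rw [PySem.Chars.rfind.go]; split; · omega
                 · exact ih

theorem rfind_ge (s sub : List Char) : -1 ≤ PySem.Chars.rfind s sub :=
  rfind_go_ge s sub s.length

-- swapping the operands of max inside a running-max fold
theorem foldl_swap (F : String → Int) (l : List String) (a : Int) :
    l.foldl (fun m sep => max (F sep) m) a = l.foldl (fun m sep => max m (F sep)) a := by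
  induction l generalizing a with
  | nil => rfl
  | cons x xs ih => simp only [List.foldl_cons, max_comm (F x) a, ih]

theorem foldl_max_pull (l : List Int) (a b : Int) :
    l.foldl max (max a b) = max a (l.foldl max b) := by
  induction l generalizing b with
  | nil => rfl
  | cons x xs ih => simp only [List.foldl_cons, max_assoc, ih]

-- A's running-max loop (+1) equals B's 1 + max-with-default over the mapped list
theorem maxfold_eq (u : List Char) (l : List String) :
    l.foldl (fun m sep => max (PySem.Chars.rfind u sep.toList) m) (-1) + 1 =
      1 + PySem.List.maxD (l.map (fun sep => PySem.Chars.rfind u sep.toList)) (fun x => x) (-1) := by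
  cases l with
  | nil => simp [PySem.List.maxD, PySem.List.max?]
  | cons s t =>
    have hx : -1 ≤ PySem.Chars.rfind u s.toList := rfind_ge _ _
    simp only [List.foldl_cons, foldl_swap, PySem.List.maxD, List.map_cons,
      PySem.List.max?_id_cons, Option.getD_some]
    have hmap : ∀ (l : List String) (a : Int),
        l.foldl (fun m sep => max m (PySem.Chars.rfind u sep.toList)) a =
          (l.map (fun sep => PySem.Chars.rfind u sep.toList)).foldl max a :=
      fun l a => (List.foldl_map (l := l) (init := a)).symm
    rw [hmap, max_comm (PySem.Chars.rfind u s.toList) (-1), foldl_max_pull]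
    have hle := (PySem.List.le_foldl_max (t.map fun sep => PySem.Chars.rfind u sep.toList)
      (PySem.Chars.rfind u s.toList)).1
    rw [max_eq_right (le_trans hx hle)]
    omega

-- a dot-free name cannot end with '.' :: e
theorem endswith_dot_false (name e : List Char) (h : PySem.Chars.isIn ['.'] name = false) :
    PySem.Chars.endswith name ('.' :: e) = false := by
  by_contra hne
  have hb : PySem.Chars.endswith name ('.' :: e) = true := by
    cases hx : PySem.Chars.endswith name ('.' :: e) <;> simp_all
  have hsuf : ('.' :: e) <:+ name := (PySem.Chars.endswith_iff _ _).mp hb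
  have hmem : '.' ∈ name := hsuf.sublist.mem (by simp)
  obtain ⟨l₁, l₂, rfl⟩ := List.mem_iff_append.mp hmem
  have : PySem.Chars.isIn ['.'] (l₁ ++ '.' :: l₂) = true :=
    (PySem.Chars.isIn_iff_infix _ _).mpr ⟨l₁, l₂, by simp⟩
  simp_all

-- A's guarded truncation of ext equals B's find-based one
theorem ext_trunc_eq (e : List Char) :
    (if PySem.Chars.isIn [','] e then
        PySem.Chars.slice e none (some (PySem.Chars.find e [','])) else e) =
      (if PySem.Chars.find e [','] = -1 then e
       else PySem.Chars.slice e none (some (PySem.Chars.find e [','])) ) := by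
  by_cases h : PySem.Chars.isIn [','] e = true
  · have : ¬ PySem.Chars.find e [','] = -1 := by
      rw [PySem.Chars.find_eq_neg_one_iff]
      exact fun hn => hn ((PySem.Chars.isIn_iff_infix _ _).mp h)
    simp [h, this]
  · have : PySem.Chars.find e [','] = -1 := by
      rw [PySem.Chars.find_eq_neg_one_iff]
      exact fun hi => h ((PySem.Chars.isIn_iff_infix _ _).mpr hi)
    simp [h, this]

-- the while-loop equals the closed-form single drop
theorem trimA_closed (name : List Char) :
    trimA name = if name.length > 75 then name.drop (30 * ((name.length - 46) / 30)) else name := by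
  induction name using trimA.induct with
  | case1 name h ih =>
    rw [trimA, if_pos h, ih]
    by_cases h2 : (name.drop 30).length > 75
    · rw [if_pos h2, if_pos h, List.drop_drop]
      congr 1
      simp only [List.length_drop]
      omega
    · rw [if_neg h2, if_pos h]
      simp only [List.length_drop] at h2
      have : 30 * ((name.length - 46) / 30) = 30 := by omega
      rw [this]
  | case2 name h =>
    rw [trimA, if_neg h, if_neg h]

-- ===== VERDICT (by name: the statement is the Claim_ definition above) =====
theorem reduce_name_spec : Claim_equal_reduce_name := by
  intro url sep_list ext _
  unfold Spec_reduce_name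
  simp only [reduce_name, reduce_name_alt, maxfold_eq, trimA_closed]
  cases ext with
  | none => rfl
  | some e0 =>
    set nm : List Char := PySem.Chars.slice url.toList
      (some (1 + PySem.List.maxD (sep_list.map fun sep => PySem.Chars.rfind url.toList sep.toList)
        (fun x => x) (-1))) none with hnm
    by_cases hd : PySem.Chars.isIn ['.'] nm = true
    · simp [hd]
    · simp only [Bool.not_eq_true] at hd
      simp only [hd, Bool.false_eq_true, if_false]
      rw [ext_trunc_eq, endswith_dot_false nm _ hd]
      simp
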